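-- pv_equiv track=rewrite | github.com/space-cap/final-team3-ai-v4 | src/agents/policy_rag.py | _group_by_policy_type
-- ===== SOURCE A (Python) =====
-- from typing import Dict, Any, List
--
-- def _group_by_policy_type(results: List[Dict[str, Any]]) -> Dict[str, List[Dict[str, Any]]]:
--     """정책 유형별 그룹화"""
--
--     grouped = {}
--     for result in results:
--         policy_type = result.get('metadata', {}).get('policy_type', 'general')
--         if policy_type not in grouped:
--             grouped[policy_type] = []
--         grouped[policy_type].append(result)
--
--     return grouped
-- ===== SOURCE B (Python) =====
-- def _group_by_policy_type(results):
--     """Group results by policy type: distinct keys in first-occurrence order, then one filter pass per key."""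
--     def key(result):
--         return result.get('metadata', {}).get('policy_type', 'general')
--     keys = list(dict.fromkeys(key(r) for r in results))
--     return {k: [r for r in results if key(r) == k] for k in keys}
-- ===== Notes on version B (the rewrite author's own statement) =====
-- stated objective: alternative
-- what changed: A builds the dict in one pass, appending each result to a bucket created on first sight; B first dedups the policy-type keys in first-occurrence order and then builds each group with one filter pass over the results per distinct key.
import Mathlib
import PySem

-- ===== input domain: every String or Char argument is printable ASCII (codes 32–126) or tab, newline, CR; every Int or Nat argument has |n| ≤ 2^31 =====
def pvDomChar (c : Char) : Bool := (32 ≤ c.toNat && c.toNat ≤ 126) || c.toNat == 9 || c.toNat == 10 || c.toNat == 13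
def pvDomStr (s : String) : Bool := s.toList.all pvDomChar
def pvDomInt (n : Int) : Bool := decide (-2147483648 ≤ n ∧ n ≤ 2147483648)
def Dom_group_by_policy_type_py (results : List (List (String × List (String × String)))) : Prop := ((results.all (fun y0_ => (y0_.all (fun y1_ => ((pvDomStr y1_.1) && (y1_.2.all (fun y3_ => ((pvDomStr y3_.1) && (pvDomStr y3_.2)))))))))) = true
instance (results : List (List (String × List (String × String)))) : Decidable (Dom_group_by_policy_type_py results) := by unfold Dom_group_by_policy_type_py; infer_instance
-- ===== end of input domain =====

-- B replaces A's one-pass bucket-appending dict loop by a two-pass scheme (dedup the keys in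
-- first-occurrence order, then one filter per key); objective: alternative decomposition, not speed.

-- ===== PORT A =====
-- A: single fold; for each result compute its policy_type, insert an empty bucket on first sight,
-- then append the result to its bucket.
def group_by_policy_type_py (results : List (List (String × List (String × String)))) : List (String × List (List (String × List (String × String)))) :=
  (results.foldl (fun grouped result =>
      let policy_type := (PySem.Dict.mk ((PySem.Dict.mk result).getD "metadata" [])).getD "policy_type" "general"
      let grouped := if grouped.contains policy_type = false then grouped.insert policy_type ([] : List (List (String × List (String × String)))) else grouped
      grouped.modify policy_type [] (fun l => l ++ [result]))
    PySem.Dict.empty).items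

-- ===== PORT B =====
-- B: key of one result (the same nested .get expression as in Source B)
def pvKey (result : List (String × List (String × String))) : String :=
  (PySem.Dict.mk ((PySem.Dict.mk result).getD "metadata" [])).getD "policy_type" "general"

def group_by_policy_type_py_alt (results : List (List (String × List (String × String)))) : List (String × List (List (String × List (String × String)))) :=
  let keys := PySem.List.dedup (results.map pvKey)
  keys.map (fun k => (k, results.filter (fun r => pvKey r == k)))

-- ===== PRECONDITION & SPEC =====
def Spec_group_by_policy_type_py (results : List (List (String × List (String × String)))) (out : List (String × List (List (String × List (String × String))))) : Prop := out = group_by_policy_type_py_alt results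
instance (results : List (List (String × List (String × String)))) (out : List (String × List (List (String × List (String × String))))) : Decidable (Spec_group_by_policy_type_py results out) := by
  unfold Spec_group_by_policy_type_py
  have i3 : DecidableEq (List (String × List (String × String))) := inferInstance
  have i4 : DecidableEq (List (List (String × List (String × String)))) := inferInstance
  have i6 : DecidableEq (List (String × List (List (String × List (String × String))))) := inferInstance
  exact i6 out _

-- ===== CLAIM (what is proved, stated in full; the proofs are below) =====
def Claim_equal_group_by_policy_type_py : Prop := ∀ (results : List (List (String × List (String × String)))), Dom_group_by_policy_type_py results → Spec_group_by_policy_type_py results (group_by_policy_type_py results)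

-- ===== LEMMAS AND PROOFS =====

-- A's conditional "insert empty bucket, then append" step is the unconditional modify step.
theorem pv_step_eq_modify {κ : Type} [BEq κ] [LawfulBEq κ] {β : Type}
    (d : PySem.Dict κ (List β)) (k : κ) (r : β) :
    (if d.contains k = false then d.insert k ([] : List β) else d).modify k [] (fun l => l ++ [r])
      = d.modify k [] (fun l => l ++ [r]) := by
  by_cases h : d.contains k = false
  · simp only [h, if_true]
    unfold PySem.Dict.modify
    rw [PySem.Dict.getD_insert_self, PySem.Dict.getD_of_not_contains d [] h]
    apply PySem.Dict.ext
    rw [PySem.Dict.items_insert_of_not_contains _ _ h]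
    rw [PySem.Dict.items_insert_of_contains, PySem.Dict.items_insert_of_not_contains _ _ h]
    · rw [List.map_append]
      have hmap : List.map (fun p => if p.1 == k then (k, [] ++ [r]) else p) d.items = d.items := by
        conv_rhs => rw [← List.map_id d.items]
        apply List.map_congr_left
        intro p hp
        have hk : (p.1 == k) = false := by
          by_contra hc
          have : p.1 = k := by
            have := eq_of_beq (a := p.1) (b := k)
            cases hb : (p.1 == k) with
            | true => exact this hb
            | false => exact absurd hb hc
          have hmem : k ∈ d.keys := by
            rw [← this]
            exact List.mem_map_of_mem hp
          have : d.contains k = true := (PySem.Dict.contains_iff_mem_keys d k).mpr hmem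
          rw [this] at h; exact absurd h (by simp)
        simp [hk]
      rw [hmap]
      simp
    · rw [PySem.Dict.contains_insert]
      simp
  · have h' : d.contains k = true := by simpa using h
    simp [h']

-- items of a dict with Nodup keys, reconstructed from keys and getD
theorem pv_items_eq_keys_map {κ ν : Type} [BEq κ] [LawfulBEq κ]
    (d : PySem.Dict κ ν) (hnd : d.keys.Nodup) (v0 : ν) :
    d.items = d.keys.map (fun k => (k, d.getD k v0)) := by
  have : d.keys.map (fun k => (k, d.getD k v0)) = d.items.map (fun p => (p.1, d.getD p.1 v0)) := by
    simp [PySem.Dict.keys, List.map_map]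
  rw [this]
  symm
  calc d.items.map (fun p => (p.1, d.getD p.1 v0))
      = d.items.map id := by
        apply List.map_congr_left
        intro p hp
        have : d.getD p.1 v0 = p.2 := PySem.Dict.getD_of_mem_items d (k := p.1) (v := p.2) (by simpa using hp) hnd v0
        simp [this]
    _ = d.items := by simp

theorem pv_main (results : List (List (String × List (String × String)))) :
    group_by_policy_type_py results = group_by_policy_type_py_alt results := by
  unfold group_by_policy_type_py group_by_policy_type_py_alt
  have hstep : results.foldl (fun grouped result =>
      let policy_type := (PySem.Dict.mk ((PySem.Dict.mk result).getD "metadata" [])).getD "policy_type" "general"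
      let grouped' := if grouped.contains policy_type = false then grouped.insert policy_type ([] : List (List (String × List (String × String)))) else grouped
      grouped'.modify policy_type [] (fun l => l ++ [result])) PySem.Dict.empty
    = results.foldl (fun grouped result =>
        grouped.modify (pvKey result) [] (fun l => l ++ [result])) PySem.Dict.empty := by
    have hfun : (fun (grouped : PySem.Dict String (List (List (String × List (String × String))))) result =>
        let policy_type := (PySem.Dict.mk ((PySem.Dict.mk result).getD "metadata" [])).getD "policy_type" "general"
        let grouped' := if grouped.contains policy_type = false then grouped.insert policy_type ([] : List (List (String × List (String × String)))) else grouped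
        grouped'.modify policy_type [] (fun l => l ++ [result]))
      = (fun (grouped : PySem.Dict String (List (List (String × List (String × String))))) result =>
        grouped.modify (pvKey result) [] (fun l => l ++ [result])) := by
      funext d r
      exact pv_step_eq_modify d (pvKey r) r
    rw [hfun]
  rw [hstep]
  set D := results.foldl (fun grouped result =>
      grouped.modify (pvKey result) [] (fun l => l ++ [result])) PySem.Dict.empty with hD
  have hnd : D.keys.Nodup := by
    rw [hD]
    exact PySem.Dict.nodup_keys_foldl_modify_key results pvKey [] (fun _ r _ => _ ++ [r]) _ PySem.Dict.nodup_keys_empty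
  have hkeys : D.keys = PySem.List.dedup (results.map pvKey) := by
    rw [hD, PySem.Dict.keys_foldl_modify_key, PySem.Dict.keys_empty,
        PySem.Set.update_nil_left, PySem.List.dedup_eq_ofList]
  have hgetD : ∀ k, D.getD k [] = results.filter (fun r => pvKey r == k) := by
    intro k
    have hfold : D = (results.map (fun r => (pvKey r, r))).foldl
        (fun d p => d.modify p.1 [] (fun l => l ++ [p.2])) PySem.Dict.empty := by
      rw [hD, List.foldl_map]
    rw [hfold, PySem.Dict.getD_foldl_modify_append, PySem.Dict.getD_empty]
    simp [List.filter_map, List.map_map, Function.comp_def]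
  rw [pv_items_eq_keys_map D hnd [], hkeys]
  apply List.map_congr_left
  intro k _
  rw [hgetD]

-- ===== VERDICT (by name: the statement is the Claim_ definition above) =====
theorem group_by_policy_type_py_spec : Claim_equal_group_by_policy_type_py := by
  intro results _
  unfold Spec_group_by_policy_type_py
  exact pv_main results
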